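-- pv_equiv track=rewrite | github.com/SamdGuizani/Learn-coding-with-Python-_2019_fun-mooc.fr | PyCharm Proj/UpyLaB Module 06/UpyLaB 6.7.py | prime_odd_numbers
-- ===== SOURCE A (Python) =====
-- import math
--
-- def even(max_nb):
--     """Retourne la liste des nombres entiers pairs inférieurs à max_nb"""
--     l_even = []
--     for i in range(max_nb + 1):
--         if i % 2 == 0:
--             l_even.append(i)
--     return l_even
--
-- def prime_numbers(max_nb):
--     """Retourne la liste des nombres premiers inférieurs à max_nb"""
--     l_prime = []
--     for i in range(max_nb + 1):
--         if premier(i):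
--             l_prime.append(i)
--     return l_prime
--
-- def premier(n):
--     """Renvoie vrai si n est un nombre premier"""
--     if n == 0 or n == 1:
--         res = False
--     else:
--         k = 2
--         res = True
--         while k <= int(math.sqrt(n)) and res is True:
--             if (n % k) == 0:
--                 res = False
--             k = k + 1
--     return res
--
-- def prime_odd_numbers(numbers):
--     """Reçoit une liste de nombres (numbers) et renvoie un couple d’ensembles contenant respectivement les nombres
--     premiers et les nombres impairs présents dans la liste."""
--     max_nb = max(numbers)
--     l_prime = prime_numbers(max_nb)
--     l_even = even(max_nb)
--
--     ens_prime = set()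
--     ens_odd = set()
--
--     for n in numbers:
--         if n not in l_even:
--             ens_odd.add(n)
--
--     for n in numbers:
--         if n in l_prime:
--             ens_prime.add(n)
--
--     return ens_prime, ens_odd
-- ===== SOURCE B (Python) =====
-- def _is_prime(n):
--     if n < 2:
--         return False
--     if n % 2 == 0:
--         return n == 2
--     d = 3
--     while d * d <= n:
--         if n % d == 0:
--             return False
--         d += 2
--     return True
--
--
-- def prime_odd_numbers(numbers):
--     evens = set(range(0, max(numbers) + 1, 2))
--     ens_prime = {n for n in numbers if _is_prime(n)}
--     ens_odd = {n for n in numbers if n not in evens}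
--     return ens_prime, ens_odd
-- ===== Notes on version B (the rewrite author's own statement) =====
-- stated objective: faster
-- what changed: B replaces A's materialised list of all primes up to max(numbers) (each built by sqrt-trial division) and the per-element linear list scans by a direct odd-trial-division primality test per element and O(1) set membership against the even range-set; Pre_ excludes only the empty list, on which A's max() raises ValueError (B raises there too).
import Mathlib
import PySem

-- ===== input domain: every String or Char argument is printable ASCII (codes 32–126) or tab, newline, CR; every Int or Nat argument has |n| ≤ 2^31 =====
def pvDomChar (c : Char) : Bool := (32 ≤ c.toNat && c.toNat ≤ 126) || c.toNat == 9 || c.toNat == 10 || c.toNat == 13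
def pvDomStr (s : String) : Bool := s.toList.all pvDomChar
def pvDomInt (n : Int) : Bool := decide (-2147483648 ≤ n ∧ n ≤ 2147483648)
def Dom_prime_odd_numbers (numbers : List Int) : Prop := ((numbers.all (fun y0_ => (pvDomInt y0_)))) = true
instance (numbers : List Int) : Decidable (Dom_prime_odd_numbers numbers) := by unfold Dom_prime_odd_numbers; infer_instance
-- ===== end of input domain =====

-- B replaces A's materialised list of all primes up to max(numbers) (and the linear
-- membership scans over it) by a direct per-element trial-division primality test,
-- and replaces the linear scan of the even list by set membership.

-- ===== PORT A =====
-- even(max_nb): list of even i in range(max_nb+1)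
def pvEven (max_nb : Int) : List Int :=
  (PySem.List.pyRange 0 (max_nb + 1) 1).foldl
    (fun l i => if PySem.Int.mod i 2 == 0 then l ++ [i] else l) []

-- the while-loop of premier: state (k, res); while k <= bound and res is True
def pvPremierLoop (n bound k : Int) (res : Bool) : Bool :=
  if k ≤ bound ∧ res = true then
    pvPremierLoop n bound (k + 1) (if PySem.Int.mod n k == 0 then false else res)
  else res
termination_by (bound + 1 - k).toNat
decreasing_by omega

-- premier(n); int(math.sqrt(n)) = Nat.sqrt exactly on the call sites (0 ≤ n ≤ 2^31)
def pvPremier (n : Int) : Bool :=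
  if n == 0 || n == 1 then false
  else pvPremierLoop n ((Nat.sqrt n.toNat : Nat) : Int) 2 true

def pvPrimeNumbers (max_nb : Int) : List Int :=
  (PySem.List.pyRange 0 (max_nb + 1) 1).foldl
    (fun l i => if pvPremier i then l ++ [i] else l) []

def prime_odd_numbers (numbers : List Int) : List Int × List Int :=
  match PySem.List.max? numbers (fun x => x) with
  | none => ([], [])   -- unreachable: Pre_ excludes the empty list (max([]) raises)
  | some max_nb =>
    let l_prime := pvPrimeNumbers max_nb
    let l_even := pvEven max_nb
    let ens_odd := numbers.foldl
      (fun s n => if n ∈ l_even then s else PySem.Set.add s n) PySem.Set.empty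
    let ens_prime := numbers.foldl
      (fun s n => if n ∈ l_prime then PySem.Set.add s n else s) PySem.Set.empty
    (ens_prime, ens_odd)

-- ===== PORT B =====
-- _is_prime: trial division by odd d while d*d <= n
def pvOddDivLoop (n d : Int) : Bool :=
  if h : d * d ≤ n then
    if PySem.Int.mod n d == 0 then false else pvOddDivLoop n (d + 2)
  else true
termination_by (n + 2 - d).toNat
decreasing_by
  have hd : d ≤ n := by nlinarith
  omega

def pvIsPrime (n : Int) : Bool :=
  if n < 2 then false
  else if PySem.Int.mod n 2 == 0 then n == 2
  else pvOddDivLoop n 3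

def prime_odd_numbers_alt (numbers : List Int) : List Int × List Int :=
  match PySem.List.max? numbers (fun x => x) with
  | none => ([], [])   -- unreachable: Pre_ excludes the empty list (max([]) raises in B too)
  | some max_nb =>
    let evens := PySem.Set.ofList (PySem.List.pyRange 0 (max_nb + 1) 2)
    (PySem.Set.ofList (numbers.filter (fun n => pvIsPrime n)),
     PySem.Set.ofList (numbers.filter (fun n => !(PySem.Set.contains evens n))))

-- ===== PRECONDITION & SPEC =====
-- Pre_ excludes exactly the empty list, on which both A's and B's max() raises ValueError.
def Pre_prime_odd_numbers (numbers : List Int) : Prop := numbers ≠ []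
instance (numbers : List Int) : Decidable (Pre_prime_odd_numbers numbers) := by
  unfold Pre_prime_odd_numbers; infer_instance

def pvWitness_prime_odd_numbers : List Int := [7, -4, 10, 3, 3]

def Spec_prime_odd_numbers (numbers : List Int) (out : List Int × List Int) : Prop :=
  out = prime_odd_numbers_alt numbers
instance (numbers : List Int) (out : List Int × List Int) :
    Decidable (Spec_prime_odd_numbers numbers out) := by
  unfold Spec_prime_odd_numbers; infer_instance

-- ===== CLAIM (what is proved, stated in full; the proofs are below) =====
def Claim_equal_prime_odd_numbers : Prop :=
  ∀ (numbers : List Int), Dom_prime_odd_numbers numbers →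
    Pre_prime_odd_numbers numbers →
    Spec_prime_odd_numbers numbers (prime_odd_numbers numbers)

-- ===== LEMMAS AND PROOFS =====

lemma pvPremierLoop_false (n bound k : Int) : pvPremierLoop n bound k false = false := by
  unfold pvPremierLoop; simp

lemma pvPremierLoop_true_iff (n bound k : Int) :
    pvPremierLoop n bound k true = true ↔
      ∀ j : Int, k ≤ j → j ≤ bound → PySem.Int.mod n j ≠ 0 := by
  by_cases hk : k ≤ bound
  · rw [pvPremierLoop, if_pos (⟨hk, rfl⟩ : k ≤ bound ∧ true = true)]
    by_cases hm : PySem.Int.mod n k = 0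
    · have hc : (PySem.Int.mod n k == 0) = true := by simp [hm]
      rw [hc, if_pos rfl, pvPremierLoop_false]
      simp only [Bool.false_eq_true, false_iff, not_forall]
      exact ⟨k, le_refl k, hk, by simp [hm]⟩
    · have hc : (PySem.Int.mod n k == 0) = false := by simp [hm]
      rw [hc]
      simp only [Bool.false_eq_true, if_false]
      rw [pvPremierLoop_true_iff n bound (k + 1)]
      constructor
      · intro h j hj1 hj2
        rcases eq_or_lt_of_le hj1 with rfl | hlt
        · exact hm
        · exact h j (by omega) hj2
      · intro h j hj1 hj2
        exact h j (by omega) hj2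
  · rw [pvPremierLoop, if_neg (by simp [hk])]
    simp only [true_iff]
    intro j hj1 hj2
    exact absurd (hj1.trans hj2) hk
termination_by (bound + 1 - k).toNat
decreasing_by omega

lemma pvOddDivLoop_true_iff (n d : Int) (hd0 : 0 ≤ d) :
    pvOddDivLoop n d = true ↔
      ∀ m : Nat, (d + 2 * m) * (d + 2 * m) ≤ n → PySem.Int.mod n (d + 2 * m) ≠ 0 := by
  by_cases h : d * d ≤ n
  · rw [pvOddDivLoop]
    rw [dif_pos h]
    by_cases hm : PySem.Int.mod n d = 0
    · have hc : (PySem.Int.mod n d == 0) = true := by simp [hm]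
      rw [hc, if_pos rfl]
      simp only [Bool.false_eq_true, false_iff, not_forall]
      exact ⟨0, by simpa using h, by simpa using hm⟩
    · have hc : (PySem.Int.mod n d == 0) = false := by simp [hm]
      rw [hc]
      simp only [Bool.false_eq_true, if_false]
      rw [pvOddDivLoop_true_iff n (d + 2) (by omega)]
      constructor
      · intro hrec m hle
        cases m with
        | zero => simpa using hm
        | succ m' =>
          have := hrec m' (by push_cast at hle ⊢; linarith)
          intro hc2; apply this
          convert hc2 using 2
          push_cast
          ring
      · intro hall m hle
        have := hall (m + 1) (by push_cast at hle ⊢; linarith)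
        intro hc2; apply this
        convert hc2 using 2
        push_cast
        ring
  · rw [pvOddDivLoop]
    rw [dif_neg h]
    simp only [true_iff]
    intro m hle
    exfalso
    apply h
    nlinarith [Int.natCast_nonneg m]
termination_by (n + 2 - d).toNat
decreasing_by
  have hdn : d ≤ n := by nlinarith
  omega

-- common characterisation: no divisor j with 2 ≤ j and j*j ≤ n
def pvNoSmallDiv (n : Int) : Prop := ∀ j : Int, 2 ≤ j → j * j ≤ n → ¬ j ∣ n

lemma pvPremier_iff (n : Int) (h2 : 2 ≤ n) : pvPremier n = true ↔ pvNoSmallDiv n := by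
  unfold pvPremier
  have hne : (n == 0 || n == 1) = false := by
    simp only [Bool.or_eq_false_iff, beq_eq_false_iff_ne]; omega
  rw [hne]
  simp only [Bool.false_eq_true, if_false]
  rw [pvPremierLoop_true_iff]
  unfold pvNoSmallDiv
  constructor
  · intro h j hj2 hjj hdvd
    have hjn : j.toNat ≤ Nat.sqrt n.toNat := by
      rw [Nat.le_sqrt]
      have hj' : (j.toNat : Int) = j := by omega
      have hn' : (n.toNat : Int) = n := by omega
      zify
      rw [hj', hn']
      exact hjj
    have := h j hj2 (by omega)
    exact this ((PySem.Int.mod_eq_zero_iff_dvd n j).mpr hdvd)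
  · intro h j hj2 hjb hmod
    have hjj : j * j ≤ n := by
      have hjn : j.toNat ≤ Nat.sqrt n.toNat := by omega
      have hle := Nat.le_sqrt.mp hjn
      have hj' : (j.toNat : Int) = j := by omega
      have hn' : (n.toNat : Int) = n := by omega
      zify at hle
      rw [hj', hn'] at hle
      exact hle
    exact absurd ((PySem.Int.mod_eq_zero_iff_dvd n j).mp hmod) (h j hj2 hjj)

lemma pvIsPrime_iff (n : Int) (h2 : 2 ≤ n) : pvIsPrime n = true ↔ pvNoSmallDiv n := by
  unfold pvIsPrime
  rw [if_neg (by omega : ¬ n < 2)]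
  by_cases he : PySem.Int.mod n 2 = 0
  · have hdvd : (2 : Int) ∣ n := (PySem.Int.mod_eq_zero_iff_dvd n 2).mp he
    simp only [he]
    simp only [beq_self_eq_true, if_true, beq_iff_eq]
    constructor
    · intro hn2 j hj2 hjj _
      subst hn2; nlinarith
    · intro h
      by_contra hne
      exact h 2 le_rfl (by omega) hdvd
  · have : (PySem.Int.mod n 2 == 0) = false := by
      simp only [beq_eq_false_iff_ne, ne_eq]; exact he
    rw [this]
    simp only [Bool.false_eq_true, if_false]
    rw [pvOddDivLoop_true_iff n 3 (by omega)]
    have hnodd : ¬ (2 : Int) ∣ n := fun hd => he ((PySem.Int.mod_eq_zero_iff_dvd n 2).mpr hd)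
    constructor
    · intro h j hj2 hjj hdvd
      have hjodd : ¬ (2 : Int) ∣ j := fun hd => hnodd (hd.trans hdvd)
      have hj3 : 3 ≤ j := by
        rcases eq_or_lt_of_le hj2 with rfl | _
        · exact absurd ⟨1, rfl⟩ hjodd
        · omega
      have hjm : j % 2 = 1 := Int.two_dvd_ne_zero.mp hjodd
      obtain ⟨m, hm⟩ : ∃ m : Nat, j = 3 + 2 * m := ⟨((j - 3) / 2).toNat, by omega⟩
      exact h m (by rw [← hm]; exact hjj)
        (by rw [← hm]; exact (PySem.Int.mod_eq_zero_iff_dvd n j).mpr hdvd)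
    · intro h m hle hmod
      exact h (3 + 2 * m) (by omega) hle ((PySem.Int.mod_eq_zero_iff_dvd n _).mp hmod)

-- the two primality predicates agree on all n ≥ 0
lemma pvPremier_eq_isPrime (n : Int) (h0 : 0 ≤ n) : pvPremier n = pvIsPrime n := by
  rcases lt_or_ge n 2 with h2 | h2
  · interval_cases n <;> rfl
  · have hA := pvPremier_iff n h2
    have hB := pvIsPrime_iff n h2
    by_cases hnd : pvNoSmallDiv n
    · rw [hA.mpr hnd, hB.mpr hnd]
    · rcases hb : pvPremier n with _ | _
      · rcases hb2 : pvIsPrime n with _ | _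
        · rfl
        · exact absurd (hB.mp hb2) hnd
      · exact absurd (hA.mp hb) hnd

lemma mem_pvEven (mx x : Int) :
    x ∈ pvEven mx ↔ 0 ≤ x ∧ x < mx + 1 ∧ PySem.Int.mod x 2 = 0 := by
  unfold pvEven
  rw [PySem.List.foldl_append_if_eq_filter]
  simp [List.mem_filter, PySem.List.mem_pyRange_one, and_assoc]

lemma mem_pvPrimeNumbers (mx x : Int) :
    x ∈ pvPrimeNumbers mx ↔ 0 ≤ x ∧ x < mx + 1 ∧ pvPremier x = true := by
  unfold pvPrimeNumbers
  rw [PySem.List.foldl_append_if_eq_filter]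
  simp [List.mem_filter, PySem.List.mem_pyRange_one, and_assoc]

-- a conditional-add fold is the fold of Set.add over the filtered list
lemma pvFoldl_addif (p : Int → Bool) (l : List Int) (acc : PySem.Set Int) :
    l.foldl (fun s n => if p n then PySem.Set.add s n else s) acc
      = (l.filter p).foldl PySem.Set.add acc := by
  induction l generalizing acc with
  | nil => rfl
  | cons x xs ih => by_cases h : p x <;> simp [h, ih]

-- membership in B's even set
lemma pvContains_evens (mx x : Int) :
    PySem.Set.contains (PySem.Set.ofList (PySem.List.pyRange 0 (mx + 1) 2)) x = true ↔
      0 ≤ x ∧ x < mx + 1 ∧ PySem.Int.mod x 2 = 0 := by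
  have hmem : x ∈ PySem.Set.ofList (PySem.List.pyRange 0 (mx + 1) 2) ↔
      0 ≤ x ∧ x < mx + 1 ∧ (2 : Int) ∣ x := by
    rw [PySem.Set.mem_ofList, PySem.List.mem_pyRange_iff_of_pos (by omega)]
    simp
  constructor
  · intro h
    have := (PySem.Set.mem_ofList _ _).mp (by
      have : x ∈ PySem.Set.ofList (PySem.List.pyRange 0 (mx + 1) 2) := by
        simpa [PySem.Set.contains] using h
      exact this)
    rw [PySem.List.mem_pyRange_iff_of_pos (by omega)] at this
    refine ⟨this.1, this.2.1, (PySem.Int.mod_eq_zero_iff_dvd x 2).mpr (by simpa using this.2.2)⟩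
  · intro ⟨h0, h1, h2⟩
    have : x ∈ PySem.Set.ofList (PySem.List.pyRange 0 (mx + 1) 2) :=
      hmem.mpr ⟨h0, h1, (PySem.Int.mod_eq_zero_iff_dvd x 2).mp h2⟩
    simpa [PySem.Set.contains] using this

-- ===== VERDICT (by name: the statement is the Claim_ definition above) =====
theorem prime_odd_numbers_spec : Claim_equal_prime_odd_numbers := by
  intro numbers _ hpre
  unfold Spec_prime_odd_numbers
  unfold prime_odd_numbers prime_odd_numbers_alt
  obtain ⟨mx, hmx⟩ : ∃ mx, PySem.List.max? numbers (fun x => x) = some mx := by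
    rcases h : PySem.List.max? numbers (fun x => x) with _ | mx
    · exact absurd ((PySem.List.max?_eq_none_iff numbers (fun x => x)).mp h) hpre
    · exact ⟨mx, rfl⟩
  rw [hmx]
  dsimp only
  have hle : ∀ n ∈ numbers, n ≤ mx := fun n hn => PySem.List.max?_isMax hmx n hn
  refine Prod.ext ?_ ?_ <;> dsimp only
  · -- prime component
    rw [PySem.Set.ofList_eq_foldl, ← pvFoldl_addif]
    apply PySem.List.foldl_congr_mem
    intro acc x hx
    have hx' : x ∈ pvPrimeNumbers mx ↔ pvIsPrime x = true := by
      rw [mem_pvPrimeNumbers]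
      constructor
      · rintro ⟨h0, _, hp⟩; rw [← pvPremier_eq_isPrime x h0]; exact hp
      · intro hp
        have h0 : 0 ≤ x := by
          by_contra hneg
          unfold pvIsPrime at hp
          rw [if_pos (by omega : x < 2)] at hp
          exact Bool.false_ne_true hp
        exact ⟨h0, by have := hle x hx; omega, by rw [pvPremier_eq_isPrime x h0]; exact hp⟩
    by_cases hp : pvIsPrime x = true
    · rw [if_pos (hx'.mpr hp), if_pos hp]
    · rw [if_neg (fun hm => hp (hx'.mp hm)), if_neg hp]
  · -- odd component
    rw [PySem.Set.ofList_eq_foldl, ← pvFoldl_addif]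
    apply PySem.List.foldl_congr_mem
    intro acc x hx
    have hx' : x ∈ pvEven mx ↔
        PySem.Set.contains (PySem.Set.ofList (PySem.List.pyRange 0 (mx + 1) 2)) x = true := by
      rw [mem_pvEven, pvContains_evens]
    by_cases hm : x ∈ pvEven mx
    · have hc : PySem.Set.contains (PySem.Set.ofList (PySem.List.pyRange 0 (mx + 1) 2)) x = true :=
        hx'.mp hm
      rw [if_pos hm, hc]
      simp
    · have hc : PySem.Set.contains (PySem.Set.ofList (PySem.List.pyRange 0 (mx + 1) 2)) x = false := by
        cases h : PySem.Set.contains (PySem.Set.ofList (PySem.List.pyRange 0 (mx + 1) 2)) x with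
        | false => rfl
        | true => exact absurd (hx'.mpr h) hm
      rw [if_neg hm, hc]
      simp
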